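-- pv_equiv track=rewrite | github.com/ilyas-asmouki/EST-message-processing-unit | mpu/model/conv_encoder.py | conv_encode_block_bits
-- ===== SOURCE A (Python) =====
-- from typing import Iterable, List
--
-- L = 7       # contraint length
--
-- M = L - 1   # memory
--
-- G1_TAPS = (6, 5, 4, 3, 0)
--
-- G2_TAPS = (6, 4, 3, 1, 0)
--
-- def _parity_from_taps(state: List[int], taps: Iterable[int]) -> int:
--     v = 0
--     for i in taps:
--         v ^= state[i]
--     return v
--
-- def conv_encode_block_bits(bits: List[int]) -> List[int]:
--     # encode a single block of bits with per-block reset and 6 zero tail bits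
--     # returns the list of encoded bits (alternating v1, v2)
--
--     state = [0] * L  # [s6..s0], all zeros at block start
--     out_bits: List[int] = []
--
--     # process data bits
--     for u in bits:
--         # shift in u at s6 (newest)
--         state = [u, state[0], state[1], state[2], state[3], state[4], state[5]]
--         v1 = _parity_from_taps(state, G1_TAPS)
--         v2 = _parity_from_taps(state, G2_TAPS)
--         out_bits.append(v1)
--         out_bits.append(v2)
--
--     # append 6 zero tail bits to return to all-zero state
--     for _ in range(M):
--         u = 0
--         state = [u, state[0], state[1], state[2], state[3], state[4], state[5]]
--         v1 = _parity_from_taps(state, G1_TAPS)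
--         v2 = _parity_from_taps(state, G2_TAPS)
--         out_bits.append(v1)
--         out_bits.append(v2)
--
--     return out_bits
-- ===== SOURCE B (Python) =====
-- from typing import List
--
-- def conv_encode_block_bits(bits: List[int]) -> List[int]:
--     # stateless form: each output bit is a fixed-delay parity of the zero-padded input
--     e = list(bits) + [0] * 6
--     def g(i: int) -> int:
--         return e[i] if i >= 0 else 0
--     out: List[int] = []
--     for t in range(len(bits) + 6):
--         out.append(g(t - 6) ^ g(t - 5) ^ g(t - 4) ^ g(t - 3) ^ g(t))
--         out.append(g(t - 6) ^ g(t - 4) ^ g(t - 3) ^ g(t - 1) ^ g(t))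
--     return out
-- ===== Notes on version B (the rewrite author's own statement) =====
-- stated objective: simpler
-- what changed: Drops A's maintained 7-slot shift-register state entirely: B zero-pads the input and computes each output pair directly as fixed-delay XORs of the padded input.
import Mathlib
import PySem

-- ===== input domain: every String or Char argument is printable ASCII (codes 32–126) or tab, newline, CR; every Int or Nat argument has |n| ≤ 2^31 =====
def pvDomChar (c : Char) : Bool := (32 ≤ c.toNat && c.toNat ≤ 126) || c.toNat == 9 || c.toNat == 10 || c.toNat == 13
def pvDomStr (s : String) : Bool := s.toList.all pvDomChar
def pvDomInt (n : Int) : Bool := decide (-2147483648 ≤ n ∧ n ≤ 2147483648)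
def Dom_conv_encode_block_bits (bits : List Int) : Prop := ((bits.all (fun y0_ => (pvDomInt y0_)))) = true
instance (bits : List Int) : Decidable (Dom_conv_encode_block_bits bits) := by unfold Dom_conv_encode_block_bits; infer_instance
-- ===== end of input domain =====

-- B replaces A's maintained 7-slot shift register by direct fixed-delay reads of the
-- zero-padded input (objective: simpler decomposition, same cost).

-- ===== PORT A =====
-- state[i] is always in range in Python (length-7 list); getD with default 0 is exact here
def pvParity (state : List Int) (taps : List Nat) : Int :=
  taps.foldl (fun v i => PySem.Int.bxor v (state.getD i 0)) 0

def pvShiftStep (p : List Int × List Int) (u : Int) : List Int × List Int :=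
  let st := [u, p.1.getD 0 0, p.1.getD 1 0, p.1.getD 2 0, p.1.getD 3 0, p.1.getD 4 0, p.1.getD 5 0]
  let v1 := pvParity st [6, 5, 4, 3, 0]
  let v2 := pvParity st [6, 4, 3, 1, 0]
  (st, p.2 ++ [v1, v2])

def conv_encode_block_bits (bits : List Int) : List Int :=
  let p1 := bits.foldl pvShiftStep (List.replicate 7 0, [])
  let p2 := (List.range 6).foldl (fun p _ => pvShiftStep p 0) p1
  p2.2

-- ===== PORT B =====
-- e[i] if i >= 0 else 0 (index always < len(e) at every call site)
def pvG (e : List Int) (i : Int) : Int := if 0 ≤ i then e.getD i.toNat 0 else 0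

def conv_encode_block_bits_alt (bits : List Int) : List Int :=
  let e := bits ++ List.replicate 6 0
  (List.range (bits.length + 6)).foldl (fun out (t : Nat) =>
    out ++ [PySem.Int.bxor (PySem.Int.bxor (PySem.Int.bxor (PySem.Int.bxor (pvG e ((t:Int) - 6)) (pvG e ((t:Int) - 5))) (pvG e ((t:Int) - 4))) (pvG e ((t:Int) - 3))) (pvG e (t:Int)),
            PySem.Int.bxor (PySem.Int.bxor (PySem.Int.bxor (PySem.Int.bxor (pvG e ((t:Int) - 6)) (pvG e ((t:Int) - 4))) (pvG e ((t:Int) - 3))) (pvG e ((t:Int) - 1))) (pvG e (t:Int))]) []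

-- ===== PRECONDITION & SPEC =====
def Spec_conv_encode_block_bits (bits : List Int) (out : List Int) : Prop := out = conv_encode_block_bits_alt bits
instance (bits : List Int) (out : List Int) : Decidable (Spec_conv_encode_block_bits bits out) := by unfold Spec_conv_encode_block_bits; infer_instance

-- ===== CLAIM (what is proved, stated in full; the proofs are below) =====
def Claim_equal_conv_encode_block_bits : Prop := ∀ (bits : List Int), Dom_conv_encode_block_bits bits → Spec_conv_encode_block_bits bits (conv_encode_block_bits bits)

-- ===== LEMMAS AND PROOFS =====

theorem pv_zero_bxor (a : Int) : PySem.Int.bxor 0 a = a := by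
  rw [PySem.Int.bxor_comm, PySem.Int.bxor_zero]

-- state after processing the first t inputs of e: entry d holds the input d steps ago (0 before start)
def pvStateAt (e : List Int) (t : Int) : List Int :=
  [pvG e (t - 1), pvG e (t - 2), pvG e (t - 3), pvG e (t - 4), pvG e (t - 5), pvG e (t - 6), pvG e (t - 7)]

-- A's tail loop over range 6 with u = 0 is the data loop over six zero bits
theorem pv_tail_as_zeros (n : Nat) (p : List Int × List Int) :
    (List.range n).foldl (fun p _ => pvShiftStep p 0) p = (List.replicate n (0 : Int)).foldl pvShiftStep p := by
  induction n generalizing p with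
  | zero => rfl
  | succ k ih =>
    rw [List.range_succ, List.replicate_succ', List.foldl_append, List.foldl_append, ih]
    rfl

theorem pv_step_at (e : List Int) (k : Nat) (out : List Int) :
    pvShiftStep (pvStateAt e k, out) (e[k]!) =
      (pvStateAt e (k + 1),
       out ++ [PySem.Int.bxor (PySem.Int.bxor (PySem.Int.bxor (PySem.Int.bxor (pvG e ((k : Int) - 6)) (pvG e ((k : Int) - 5))) (pvG e ((k : Int) - 4))) (pvG e ((k : Int) - 3))) (pvG e (k : Int)),
               PySem.Int.bxor (PySem.Int.bxor (PySem.Int.bxor (PySem.Int.bxor (pvG e ((k : Int) - 6)) (pvG e ((k : Int) - 4))) (pvG e ((k : Int) - 3))) (pvG e ((k : Int) - 1))) (pvG e (k : Int))]) := by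
  have hget : pvG e (k : Int) = e[k]! := by
    simp [pvG, List.getD, List.getElem!_eq_getElem?_getD]
  have h1 : ((k : Int) + 1) - 1 = (k : Int) := by ring
  have h2 : ((k : Int) + 1) - 2 = (k : Int) - 1 := by ring
  have h3 : ((k : Int) + 1) - 3 = (k : Int) - 2 := by ring
  have h4 : ((k : Int) + 1) - 4 = (k : Int) - 3 := by ring
  have h5 : ((k : Int) + 1) - 5 = (k : Int) - 4 := by ring
  have h6 : ((k : Int) + 1) - 6 = (k : Int) - 5 := by ring
  have h7 : ((k : Int) + 1) - 7 = (k : Int) - 6 := by ring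
  simp only [pvShiftStep, pvParity, pvStateAt, List.foldl, List.getD, List.getElem?_cons_zero,
    List.getElem?_cons_succ, Option.getD_some, hget, pv_zero_bxor]
  rw [h1, h2, h3, h4, h5, h6, h7]
  rw [hget]

theorem pv_invariant (e : List Int) (k : Nat) (hk : k ≤ e.length) :
    (e.take k).foldl pvShiftStep (List.replicate 7 0, []) =
      (pvStateAt e k,
       (List.range k).foldl (fun out (t : Nat) =>
         out ++ [PySem.Int.bxor (PySem.Int.bxor (PySem.Int.bxor (PySem.Int.bxor (pvG e ((t:Int) - 6)) (pvG e ((t:Int) - 5))) (pvG e ((t:Int) - 4))) (pvG e ((t:Int) - 3))) (pvG e (t:Int)),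
                 PySem.Int.bxor (PySem.Int.bxor (PySem.Int.bxor (PySem.Int.bxor (pvG e ((t:Int) - 6)) (pvG e ((t:Int) - 4))) (pvG e ((t:Int) - 3))) (pvG e ((t:Int) - 1))) (pvG e (t:Int))]) []) := by
  induction k with
  | zero => simp [pvStateAt, pvG]
  | succ m ih =>
    have hm : m ≤ e.length := Nat.le_of_succ_le hk
    have hm' : m < e.length := hk
    have htake : e.take (m + 1) = e.take m ++ [e[m]!] := by
      rw [List.getElem!_eq_getElem?_getD, List.take_add_one]
      simp [List.getElem?_eq_getElem hm']
    rw [htake, List.foldl_append, ih hm, List.range_succ, List.foldl_append]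
    simpa using pv_step_at e m _

theorem pv_main (bits : List Int) :
    conv_encode_block_bits bits = conv_encode_block_bits_alt bits := by
  simp only [conv_encode_block_bits, conv_encode_block_bits_alt]
  rw [pv_tail_as_zeros, ← List.foldl_append]
  have hlen : (bits ++ List.replicate 6 (0 : Int)).length = bits.length + 6 := by simp
  have htake : (bits ++ List.replicate 6 (0 : Int)).take (bits.length + 6) = bits ++ List.replicate 6 (0 : Int) := by
    rw [← hlen, List.take_length]
  have := pv_invariant (bits ++ List.replicate 6 0) (bits.length + 6) (by simp)
  rw [htake] at this
  rw [this]

-- ===== VERDICT (by name: the statement is the Claim_ definition above) =====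
theorem conv_encode_block_bits_spec : Claim_equal_conv_encode_block_bits := by
  intro bits _
  unfold Spec_conv_encode_block_bits
  exact pv_main bits
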